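-- pv_equiv track=rewrite | github.com/huntern54/Coding_Projects | Games/Practice.py | reverseStringInAListofStrings
-- ===== SOURCE A (Python) =====
-- def reverseStringInAListofStrings(stringList):
--
--     reversedList = []
--
--     for string in stringList:
--         stringInReverseList = list(string)
--         leftPointer, rightPointer = 0, len(string) - 1
--
--         while leftPointer < rightPointer:
--             temp = stringInReverseList[leftPointer]
--             stringInReverseList[leftPointer] = stringInReverseList[rightPointer]
--             stringInReverseList[rightPointer] = temp
--             leftPointer += 1
--             rightPointer -= 1
--
--         reversedString = ''.join(stringInReverseList)
--         reversedList.append(reversedString)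
--
--     return reversedList
-- ===== SOURCE B (Python) =====
-- def reverseStringInAListofStrings(stringList):
--     return [s[::-1] for s in stringList]
-- ===== Notes on version B (the rewrite author's own statement) =====
-- stated objective: idiomatic
-- what changed: Replaces the in-place two-pointer character-swap loop (mutable char list, left/right pointers, join) with a single comprehension reversing each string by slicing s[::-1].
import Mathlib
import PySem

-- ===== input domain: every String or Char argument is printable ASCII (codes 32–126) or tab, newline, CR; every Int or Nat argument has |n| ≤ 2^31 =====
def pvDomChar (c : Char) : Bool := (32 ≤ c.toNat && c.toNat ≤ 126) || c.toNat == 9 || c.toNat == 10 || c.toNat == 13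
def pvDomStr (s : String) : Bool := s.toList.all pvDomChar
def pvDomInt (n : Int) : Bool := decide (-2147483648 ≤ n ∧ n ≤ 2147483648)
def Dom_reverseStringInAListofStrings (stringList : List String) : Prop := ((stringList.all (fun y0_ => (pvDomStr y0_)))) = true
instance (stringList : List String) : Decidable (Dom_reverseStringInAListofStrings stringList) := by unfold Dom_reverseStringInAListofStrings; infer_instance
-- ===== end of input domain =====

-- B replaces the two-pointer in-place swap reversal of each string with the
-- idiomatic per-string slice reversal [s[::-1] for s in stringList].


-- ===== PORT A =====
-- while-loop: swap cs[l] and cs[r], l += 1, r -= 1 while l < r.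
-- Pointers are Nat: in Python they only go negative (r = -1) for the empty
-- string, where the loop body never runs, so the behaviour is identical.
-- Indices are always in range inside the loop (0 <= l < r < cs.length).
def pvSwapLoop (cs : List Char) (l r : Nat) : List Char :=
  if l < r then
    let temp := cs.getD l ' '
    let cs1 := cs.set l (cs.getD r ' ')
    let cs2 := cs1.set r temp
    pvSwapLoop cs2 (l + 1) (r - 1)
  else cs
termination_by r - l

def reverseStringInAListofStrings (stringList : List String) : List String :=
  stringList.foldl (fun reversedList string =>
    let stringInReverseList := string.toList          -- list(string)
    let final := pvSwapLoop stringInReverseList 0 (string.toList.length - 1)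
    reversedList ++ [String.mk final])                -- ''.join + append
    []


-- ===== PORT B =====
-- B: [s[::-1] for s in stringList]; s[::-1] is exactly List.reverse of the chars.
def reverseStringInAListofStrings_alt (stringList : List String) : List String :=
  stringList.map (fun s => String.mk s.toList.reverse)


-- ===== PRECONDITION & SPEC =====
def Spec_reverseStringInAListofStrings (stringList : List String) (out : List String) : Prop := out = reverseStringInAListofStrings_alt stringList
instance (stringList : List String) (out : List String) : Decidable (Spec_reverseStringInAListofStrings stringList out) := by unfold Spec_reverseStringInAListofStrings; infer_instance

-- ===== CLAIM (what is proved, stated in full; the proofs are below) =====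
def Claim_equal_reverseStringInAListofStrings : Prop := ∀ (stringList : List String), Dom_reverseStringInAListofStrings stringList → Spec_reverseStringInAListofStrings stringList (reverseStringInAListofStrings stringList)

-- ===== LEMMAS AND PROOFS =====

theorem pvSwapLoop_getElem? (cs : List Char) (l r : Nat) (hr : r < cs.length) (i : Nat) :
    (pvSwapLoop cs l r)[i]?
      = if l ≤ i ∧ i ≤ r then cs[l + r - i]? else cs[i]? := by
  fun_induction pvSwapLoop cs l r with
  | case1 cs l r hlr temp cs1 cs2 ih =>
    have hl : l < cs.length := lt_trans hlr hr
    have hlen1 : cs1.length = cs.length := by simp [cs1]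
    have hlen2 : cs2.length = cs.length := by simp [cs2, hlen1]
    rw [ih (by omega)]
    have hget : ∀ j, cs2[j]? =
        if j = l then cs[r]?
        else if j = r then cs[l]?
        else cs[j]? := by
      intro j
      by_cases hjl : j = l <;> by_cases hjr : j = r
      · omega
      · rw [if_pos hjl, hjl, show cs2 = cs1.set r temp from rfl,
            List.getElem?_set_ne (by omega), show cs1 = cs.set l (cs.getD r ' ') from rfl,
            List.getElem?_set_eq_of_lt _ hl,
            List.getD_eq_getElem?_getD, List.getElem?_eq_getElem hr]
        rfl
      · rw [if_neg hjl, if_pos hjr, hjr, show cs2 = cs1.set r temp from rfl,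
            List.getElem?_set_eq_of_lt _ (by omega),
            show temp = cs.getD l ' ' from rfl,
            List.getD_eq_getElem?_getD, List.getElem?_eq_getElem hl]
        rfl
      · rw [if_neg hjl, if_neg hjr, show cs2 = cs1.set r temp from rfl,
            List.getElem?_set_ne (by omega), show cs1 = cs.set l (cs.getD r ' ') from rfl,
            List.getElem?_set_ne (by omega)]
    simp only [hget]
    split_ifs <;> first | rfl | omega | exact congrArg (fun k => cs[k]?) (by omega)
  | case2 cs l r hlr =>
    split_ifs with h
    · exact congrArg (fun k => cs[k]?) (by omega)
    · rfl

theorem pvSwapLoop_reverse (cs : List Char) :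
    pvSwapLoop cs 0 (cs.length - 1) = cs.reverse := by
  cases cs with
  | nil => simp [pvSwapLoop]
  | cons a t =>
    have hn : (a :: t).length = t.length + 1 := by simp
    apply List.ext_getElem?
    intro i
    rw [pvSwapLoop_getElem? _ _ _ (by omega)]
    by_cases hi : i < (a :: t).length
    · rw [if_pos (by omega), List.getElem?_reverse hi]
      congr 1; omega
    · rw [if_neg (by omega), List.getElem?_eq_none (by omega),
          List.getElem?_eq_none (by rw [List.length_reverse]; omega)]

theorem foldl_rev_eq_map (stringList : List String) (acc : List String) :
    stringList.foldl (fun reversedList string =>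
      reversedList ++ [String.mk (pvSwapLoop string.toList 0 (string.toList.length - 1))]) acc
    = acc ++ stringList.map (fun s => String.mk s.toList.reverse) := by
  induction stringList generalizing acc with
  | nil => simp
  | cons s t ih => rw [List.foldl_cons, ih, pvSwapLoop_reverse]; simp

-- ===== VERDICT (by name: the statement is the Claim_ definition above) =====
theorem reverseStringInAListofStrings_spec : Claim_equal_reverseStringInAListofStrings := by
  intro stringList _
  unfold Spec_reverseStringInAListofStrings reverseStringInAListofStrings
    reverseStringInAListofStrings_alt
  simpa using foldl_rev_eq_map stringList []
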